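-- pv_equiv track=rewrite | github.com/Vintage-lavender/programmers-Baekjoon | 프로그래머스/lv1/92334. 신고 결과 받기/신고 결과 받기.py | solution
-- ===== SOURCE A (Python) =====
-- def solution(id_list, report, k):
--     mail = {id:0 for id in id_list}
--     block = {id:[] for id in id_list}
--     for r in report:
--         s, e = r.split()
--         block[e].append(s)
--     for id in id_list:
--         real = set(block[id])
--         if len(real) >=k:
--             for i in real:
--                 mail[i] += 1
--     answer = []
--     for i in mail:
--         answer.append(mail[i])
--
--     return answer
-- ===== SOURCE B (Python) =====
-- def solution(id_list, report, k):
--     pairs = {tuple(r.split()) for r in report}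
--     counts = {}
--     for s, e in pairs:
--         counts[e] = counts.get(e, 0) + 1
--     banned = {u for u, c in counts.items() if c >= k}
--     mail = {i: 0 for i in id_list}
--     for s, e in pairs:
--         if e in banned:
--             mail[s] += 1
--     return list(mail.values())
-- ===== Notes on version B (the rewrite author's own statement) =====
-- stated objective: alternative
-- what changed: B replaces A's per-user adjacency dict (block lists, then a per-user set with a nested increment loop) by one global dedup of the (reporter, target) pairs followed by two flat passes: count distinct reporters per target into a dict, build the banned set, then bump mail[reporter] once per unique banned pair.
-- intended difference: When id_list contains a duplicated id that collects at least k distinct reporters (at least one), A processes that id's block once per occurrence and so double-counts its reporters' mails, while B counts each banned target once per reporter, the intended tally. — e.g. on solution(["a", "b", "b"], ["a b"], 1): A returns [2, 0], B returns [1, 0]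
import Mathlib
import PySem

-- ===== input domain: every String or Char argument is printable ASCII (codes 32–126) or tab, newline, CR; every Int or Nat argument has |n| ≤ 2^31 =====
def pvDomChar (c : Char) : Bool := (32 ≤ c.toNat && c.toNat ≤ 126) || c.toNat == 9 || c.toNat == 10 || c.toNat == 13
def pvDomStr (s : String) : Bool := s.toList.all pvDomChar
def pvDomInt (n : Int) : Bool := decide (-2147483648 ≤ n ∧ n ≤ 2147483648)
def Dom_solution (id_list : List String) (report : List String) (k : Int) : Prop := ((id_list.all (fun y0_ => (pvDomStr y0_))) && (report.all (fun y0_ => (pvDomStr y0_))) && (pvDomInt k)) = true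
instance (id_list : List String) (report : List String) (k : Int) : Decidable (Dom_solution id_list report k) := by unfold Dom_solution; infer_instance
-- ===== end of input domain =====

-- B replaces A's per-user adjacency dict and nested per-user set loop by one global dedup of the
-- (reporter, target) pairs followed by two flat counting passes (objective: alternative, same cost).

-- ===== PORT A =====
-- shared unpack helper: Python's 2-tuple unpacking `s, e = ...` (the ≠ 2-token ValueError inputs are outside Pre_)
def pvCase2 {α : Type} (p : List String) (f : String → String → α) (d : α) : α :=
  match p with
  | [s, t] => f s t
  | _ => d
def solution (id_list : List String) (report : List String) (k : Int) : List Int :=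
  let mail : PySem.Dict String Int :=
    id_list.foldl (fun d id => d.insert id 0) PySem.Dict.empty
  let block : PySem.Dict String (List String) :=
    id_list.foldl (fun d id => d.insert id []) PySem.Dict.empty
  let block :=
    report.foldl (fun b r =>
      pvCase2 (PySem.Str.split₀ r) (fun s e => b.modify e [] (· ++ [s])) b) block
      -- block[e].append(s); the KeyError (e not a key) inputs are outside Pre_
  let mail :=
    id_list.foldl (fun m id =>
      let real : PySem.Set String := PySem.Set.ofList (block.getD id [])
      if k ≤ (real.length : Int) then
        real.foldl (fun m i => m.modify i 0 (· + 1)) m   -- mail[i] += 1; i is a key inside Pre_ (KeyError otherwise)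
      else m) mail
  mail.keys.foldl (fun answer i => answer ++ [mail.getD i 0]) []   -- for i in mail: answer.append(mail[i])

-- ===== PORT B =====
def solution_alt (id_list : List String) (report : List String) (k : Int) : List Int :=
  let pairs : PySem.Set (List String) :=
    PySem.Set.ofList (report.map (fun r => PySem.Str.split₀ r))   -- {tuple(r.split()) for r in report}
  let counts : PySem.Dict String Int :=
    pairs.foldl (fun c p =>
      pvCase2 p (fun _s e => c.insert e (c.getD e 0 + 1)) c) PySem.Dict.empty
      -- counts[e] = counts.get(e, 0) + 1
  let banned : PySem.Set String :=
    PySem.Set.ofList ((counts.items.filter (fun uc => k ≤ uc.2)).map (fun uc => uc.1))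
  let mail : PySem.Dict String Int :=
    id_list.foldl (fun m i => m.insert i 0) PySem.Dict.empty
  let mail :=
    pairs.foldl (fun m p =>
      pvCase2 p (fun s e => if banned.contains e then m.modify s 0 (· + 1) else m) m) mail
      -- mail[s] += 1; s is a key inside Pre_
  mail.values

-- helpers also used by Pre_: the first / second token of a report line, and the set of reporters of e
def pvSrc (r : String) : String := (PySem.Str.split₀ r).getD 0 ""
def pvTgt (r : String) : String := (PySem.Str.split₀ r).getD 1 ""

-- the reporters of e, in report order (A's block[e]); pvReal rep e = set(block[e])
def pvReporters (rep : List String) (e : String) : List String :=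
  (rep.filter (fun r => pvTgt r == e)).map pvSrc

def pvReal (rep : List String) (e : String) : PySem.Set String :=
  PySem.Set.ofList (pvReporters rep e)

-- ===== PRECONDITION & SPEC =====
-- Pre_ excludes exactly the inputs on which A raises: a report that does not split into two tokens
-- (ValueError), a reported target not in id_list (KeyError at block[e]), or a reporter outside id_list
-- whose target collects ≥ k distinct reporters (KeyError at mail[i]).
def Pre_solution (id_list : List String) (report : List String) (k : Int) : Prop :=
  ∀ r ∈ report, (PySem.Str.split₀ r).length = 2 ∧ pvTgt r ∈ id_list ∧
    (pvSrc r ∈ id_list ∨ ((pvReal report (pvTgt r)).length : Int) < k)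
instance (id_list : List String) (report : List String) (k : Int) : Decidable (Pre_solution id_list report k) := by unfold Pre_solution; infer_instance

def pvWitness_solution : List String × List String × Int := (["muzi", "frodo"], ["muzi frodo"], 1)


-- When id_list contains a duplicated id that collects at least k distinct reporters (at least one), A
-- processes that id's block once per occurrence and so double-counts its reporters' mails, while B
-- counts each banned target once per reporter, the intended tally.
def D_solution (id_list : List String) (report : List String) (k : Int) : Prop :=
  ∃ e ∈ id_list, 2 ≤ id_list.count e ∧ k ≤ ((pvReal report e).length : Int) ∧ pvReal report e ≠ []
instance (id_list : List String) (report : List String) (k : Int) : Decidable (D_solution id_list report k) := by unfold D_solution; infer_instance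

def pvDiffWitness_solution : List String × List String × Int := (["a", "b", "b"], ["a b"], 1)
def pvDiffWitnessOut_solution : (List Int) × (List Int) := ([2, 0], [1, 0])

def Spec_solution (id_list : List String) (report : List String) (k : Int) (out : List Int) : Prop := ¬ D_solution id_list report k → out = solution_alt id_list report k
instance (id_list : List String) (report : List String) (k : Int) (out : List Int) : Decidable (Spec_solution id_list report k out) := by unfold Spec_solution; infer_instance

-- ===== CLAIM (what is proved, stated in full; the proofs are below) =====
def Claim_unchanged_solution : Prop := ∀ (id_list : List String) (report : List String) (k : Int), Dom_solution id_list report k → Pre_solution id_list report k → Spec_solution id_list report k (solution id_list report k)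
def Claim_changed_solution : Prop := Dom_solution (pvDiffWitness_solution.1) (pvDiffWitness_solution.2.1) (pvDiffWitness_solution.2.2) ∧ Pre_solution (pvDiffWitness_solution.1) (pvDiffWitness_solution.2.1) (pvDiffWitness_solution.2.2) ∧ D_solution (pvDiffWitness_solution.1) (pvDiffWitness_solution.2.1) (pvDiffWitness_solution.2.2) ∧ solution (pvDiffWitness_solution.1) (pvDiffWitness_solution.2.1) (pvDiffWitness_solution.2.2) = pvDiffWitnessOut_solution.1 ∧ solution_alt (pvDiffWitness_solution.1) (pvDiffWitness_solution.2.1) (pvDiffWitness_solution.2.2) = pvDiffWitnessOut_solution.2 ∧ pvDiffWitnessOut_solution.1 ≠ pvDiffWitnessOut_solution.2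
def Claim_exact_solution : Prop := ∀ (id_list : List String) (report : List String) (k : Int), Dom_solution id_list report k → Pre_solution id_list report k → D_solution id_list report k → solution id_list report k ≠ solution_alt id_list report k

-- ===== LEMMAS AND PROOFS =====

-- getD after seeding a dict with a constant value v at every id
theorem pv_getD_seed {ν : Type} (ids : List String) (d : PySem.Dict String ν) (v : ν) (e : String)
    (h : d.getD e v = v) :
    (ids.foldl (fun d i => d.insert i v) d).getD e v = v := by
  induction ids generalizing d with
  | nil => simpa using h
  | cons i ids ih =>
      simp only [List.foldl_cons]
      exact ih _ (by
        by_cases he : e = i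
        · subst he; simp [PySem.Dict.getD_insert_self]
        · rw [PySem.Dict.getD_insert_of_ne _ _ _ he]; exact h)

-- keys after seeding a dict with a constant value at every id: the deduplicated id list
theorem pv_keys_seed {ν : Type} (ids : List String) (f : PySem.Dict String ν → String → ν) :
    (ids.foldl (fun d i => d.insert i (f d i)) (PySem.Dict.empty : PySem.Dict String ν)).keys
      = PySem.Set.ofList ids := by
  rw [PySem.Dict.keys_foldl_insert]
  show PySem.Set.update (PySem.Dict.empty : PySem.Dict String ν).keys ids = _
  have : (PySem.Dict.empty : PySem.Dict String ν).keys = [] := rfl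
  rw [this, PySem.Set.update_nil_left]

-- inserting at an existing key keeps the key list
theorem pv_keys_insert_mem {ν : Type} (d : PySem.Dict String ν) (x : String) (v : ν)
    (h : x ∈ d.keys) : (d.insert x v).keys = d.keys := by
  have hfold := PySem.Dict.keys_foldl_insert [x] (fun _ _ => v) d
  simp only [List.foldl_cons, List.foldl_nil] at hfold
  rw [hfold, PySem.Set.update_cons, PySem.Set.add_of_mem h, PySem.Set.update_eq_append_filter]
  simp

-- a sum over a list with duplicates collapses to its dedup when duplicated entries contribute 0
theorem pv_sum_dedup (ids : List String) (f : String → Int)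
    (h : ∀ e ∈ ids, 2 ≤ ids.count e → f e = 0) :
    (ids.map f).sum = ((PySem.Set.ofList ids).map f).sum := by
  rw [Finset.sum_list_map_count, Finset.sum_list_map_count]
  have hfs : (PySem.Set.ofList ids).toFinset = ids.toFinset := by
    ext x
    simp only [List.mem_toFinset]
    exact PySem.Set.mem_ofList ids x
  rw [hfs]
  refine Finset.sum_congr rfl ?_
  intro e he
  have hemem : e ∈ ids := List.mem_toFinset.mp he
  have h1 : (PySem.Set.ofList ids).count e = 1 :=
    List.count_eq_one_of_mem (PySem.Set.nodup_ofList ids) ((PySem.Set.mem_ofList ids e).mpr hemem)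
  rw [h1]
  by_cases hd : 2 ≤ ids.count e
  · rw [h e hemem hd]
    simp
  · have h1' : ids.count e = 1 := by
      have := List.count_pos_iff.mpr hemem
      omega
    rw [h1']

-- a 2-token list is literally [s, t]
theorem pv_shape (p : List String) (h : p.length = 2) : ∃ s t, p = [s, t] := by
  match p with
  | [s, t] => exact ⟨s, t, rfl⟩
  | [] | [_] | _ :: _ :: _ :: _ => simp at h

-- A's report loop: block.getD e [] collects the reporters of e, in report order
theorem pvCase2_pair {α : Type} (s t : String) (f : String → String → α) (d : α) :
    pvCase2 [s, t] f d = f s t := rfl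

theorem pv_blockA (rep : List String) (b : PySem.Dict String (List String)) (e : String)
    (hsh : ∀ r ∈ rep, (PySem.Str.split₀ r).length = 2) :
    ((rep.foldl (fun b r =>
        pvCase2 (PySem.Str.split₀ r) (fun s t => b.modify t [] (· ++ [s])) b) b).getD e []) =
      b.getD e [] ++ (rep.filter (fun r => pvTgt r == e)).map pvSrc := by
  induction rep generalizing b with
  | nil => simp
  | cons r rep ih =>
      obtain ⟨s, t, hsp⟩ : ∃ s t, PySem.Str.split₀ r = [s, t] := by
        have h2 := hsh r (List.mem_cons_self ..)
        match h : PySem.Str.split₀ r with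
        | [s, t] => exact ⟨s, t, rfl⟩
        | [] | [_] | _ :: _ :: _ :: _ => simp [h] at h2
      have hs : pvSrc r = s := by simp [pvSrc, hsp]
      have ht : pvTgt r = t := by simp [pvTgt, hsp]
      simp only [List.foldl_cons, hsp, pvCase2_pair]
      rw [ih _ (fun x hx => hsh x (List.mem_cons_of_mem _ hx))]
      by_cases he : t = e
      · subst he
        rw [List.filter_cons_of_pos (by simp [ht])]
        simp [PySem.Dict.getD_modify_self, hs]
      · rw [List.filter_cons_of_neg (by simp [ht, he])]
        rw [PySem.Dict.getD_modify_of_ne _ _ _ (Ne.symm he)]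

-- A's second loop, value at i
theorem pv_mailA (ids : List String) (m : PySem.Dict String Int) (k : Int)
    (real : String → PySem.Set String) (i : String) (hnd : ∀ id, (real id).Nodup) :
    ((ids.foldl (fun m id =>
        if k ≤ ((real id).length : Int) then
          (real id).foldl (fun m i => m.modify i 0 (· + 1)) m
        else m) m).getD i 0) =
      m.getD i 0 + (ids.map (fun id =>
        if k ≤ ((real id).length : Int) ∧ i ∈ real id then (1 : Int) else 0)).sum := by
  induction ids generalizing m with
  | nil => simp
  | cons id ids ih =>
      simp only [List.foldl_cons, List.map_cons, List.sum_cons]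
      by_cases hc : k ≤ ((real id).length : Int)
      · rw [if_pos hc, ih, PySem.Dict.getD_foldl_modify_add_one]
        by_cases hm : i ∈ real id
        · rw [if_pos ⟨hc, hm⟩, List.count_eq_one_of_mem (hnd id) hm]
          push_cast; ring
        · rw [if_neg (by tauto), List.count_eq_zero_of_not_mem hm]
          push_cast; ring
      · rw [if_neg hc, ih, if_neg (by tauto)]; ring

-- A's second loop keeps the key list when every incremented reporter is already a key
theorem pv_keysA (ids : List String) (m : PySem.Dict String Int) (k : Int)
    (real : String → PySem.Set String) (ks : List String)
    (hk : m.keys = ks) (hsub : ∀ id ∈ ids, k ≤ ((real id).length : Int) → ∀ s ∈ real id, s ∈ ks) :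
    ((ids.foldl (fun m id =>
        if k ≤ ((real id).length : Int) then
          (real id).foldl (fun m i => m.modify i 0 (· + 1)) m
        else m) m).keys) = ks := by
  induction ids generalizing m with
  | nil => simpa using hk
  | cons id ids ih =>
      simp only [List.foldl_cons]
      refine ih _ ?_ (fun id' h' hc s hs => hsub id' (List.mem_cons_of_mem _ h') hc s hs)
      by_cases hc : k ≤ ((real id).length : Int)
      · rw [if_pos hc, PySem.Dict.keys_foldl_modify, hk, PySem.Set.update_eq_append_filter]
        have hnil : ((PySem.Set.ofList (real id)).filter (fun y => !(PySem.Set.contains ks y))) = [] := by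
          rw [List.filter_eq_nil_iff]
          intro a ha
          have : a ∈ real id := (PySem.Set.mem_ofList _ _).mp ha
          have : a ∈ ks := hsub id (List.mem_cons_self ..) hc a this
          simp [PySem.Set.contains, this]
        rw [hnil, List.append_nil]
      · rw [if_neg hc]; exact hk

-- B's counting loop over shaped pairs: value and keys
theorem pv_countsB (l : List (List String)) (c : PySem.Dict String Int) (e : String)
    (hsh : ∀ p ∈ l, p.length = 2) :
    ((l.foldl (fun c p =>
        pvCase2 p (fun _s t => c.insert t (c.getD t 0 + 1)) c) c).getD e 0) =
      c.getD e 0 + (((l.map (fun p => p.getD 1 "")).count e : Nat) : Int) := by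
  rw [PySem.List.foldl_congr_mem l _
      (fun c p => c.insert (p.getD 1 "") (c.getD (p.getD 1 "") 0 + 1)) c ?_]
  · have hm : List.foldl (fun (c : PySem.Dict String Int) t => c.insert t (c.getD t 0 + 1)) c
        (l.map (fun p => p.getD 1 "")) =
        List.foldl (fun c p => c.insert (p.getD 1 "") (c.getD (p.getD 1 "") 0 + 1)) c l :=
      List.foldl_map
    rw [← hm, PySem.Dict.getD_foldl_insert_add_one]
  · intro acc p hp
    obtain ⟨s, t, rfl⟩ := pv_shape p (hsh p hp)
    simp [pvCase2_pair]

theorem pv_countsB_keys (l : List (List String)) (c : PySem.Dict String Int)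
    (hsh : ∀ p ∈ l, p.length = 2) :
    ((l.foldl (fun c p =>
        pvCase2 p (fun _s t => c.insert t (c.getD t 0 + 1)) c) c).keys) = PySem.Set.update c.keys (l.map (fun p => p.getD 1 "")) := by
  rw [PySem.List.foldl_congr_mem l _
      (fun c p => c.insert (p.getD 1 "") (c.getD (p.getD 1 "") 0 + 1)) c ?_]
  · exact PySem.Dict.keys_foldl_insert_key l _ (fun c p => c.getD (p.getD 1 "") 0 + 1) c
  · intro acc p hp
    obtain ⟨s, t, rfl⟩ := pv_shape p (hsh p hp)
    simp [pvCase2_pair]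

-- B's mail loop over shaped pairs, value at i
theorem pv_mailB (l : List (List String)) (m : PySem.Dict String Int) (banned : PySem.Set String) (i : String)
    (hsh : ∀ p ∈ l, p.length = 2) :
    ((l.foldl (fun m p =>
        pvCase2 p (fun s t => if banned.contains t then m.modify s 0 (· + 1) else m) m) m).getD i 0) =
      m.getD i 0 + ((l.countP (fun p => p.getD 0 "" == i && banned.contains (p.getD 1 "")) : Nat) : Int) := by
  induction l generalizing m with
  | nil => simp
  | cons p l ih =>
      obtain ⟨s, t, rfl⟩ := pv_shape p (hsh p (List.mem_cons_self ..))
      have h0 : ([s, t] : List String).getD 0 "" = s := rfl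
      have h1 : ([s, t] : List String).getD 1 "" = t := rfl
      simp only [List.foldl_cons, List.countP_cons, h0, h1, pvCase2_pair]
      rw [ih _ (fun q hq => hsh q (List.mem_cons_of_mem _ hq))]
      by_cases hb : banned.contains t = true
      · simp only [hb, if_true]
        by_cases hi : s = i
        · subst hi
          rw [PySem.Dict.getD_modify_self]
          simp only [beq_self_eq_true, Bool.and_true, if_true]
          push_cast; ring
        · rw [PySem.Dict.getD_modify_of_ne _ _ _ (Ne.symm hi)]
          have hp : (s == i) = false := by simp [hi]
          simp only [Bool.and_true, hp, Bool.false_eq_true, if_false]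
          push_cast; ring
      · have hb' : banned.contains t = false := by simpa using hb
        simp only [hb', Bool.false_eq_true, if_false, Bool.and_false]
        push_cast; ring


-- strict version: a duplicated entry with a positive contribution makes the undeduplicated sum larger
theorem pv_sum_dedup_lt (ids : List String) (f : String → Int)
    (hnn : ∀ e, 0 ≤ f e) (e : String) (he : e ∈ ids) (h2 : 2 ≤ ids.count e) (hpos : 0 < f e) :
    ((PySem.Set.ofList ids).map f).sum < (ids.map f).sum := by
  rw [Finset.sum_list_map_count, Finset.sum_list_map_count]
  have hfs : (PySem.Set.ofList ids).toFinset = ids.toFinset := by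
    ext x
    simp only [List.mem_toFinset]
    exact PySem.Set.mem_ofList ids x
  rw [hfs]
  refine Finset.sum_lt_sum ?_ ⟨e, List.mem_toFinset.mpr he, ?_⟩
  · intro x hx
    have hxm : x ∈ ids := List.mem_toFinset.mp hx
    have hc1 : 1 ≤ ids.count x := List.count_pos_iff.mpr hxm
    rw [List.count_eq_one_of_mem (PySem.Set.nodup_ofList ids) ((PySem.Set.mem_ofList ids x).mpr hxm),
      nsmul_eq_mul, nsmul_eq_mul]
    exact mul_le_mul_of_nonneg_right (by exact_mod_cast hc1) (hnn x)
  · rw [List.count_eq_one_of_mem (PySem.Set.nodup_ofList ids) ((PySem.Set.mem_ofList ids e).mpr he),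
      nsmul_eq_mul, nsmul_eq_mul]
    exact mul_lt_mul_of_pos_right (by exact_mod_cast h2) hpos

-- B's mail loop keeps the key list when every bumped reporter is already a key
theorem pv_mailB_keys (l : List (List String)) (m : PySem.Dict String Int)
    (banned : PySem.Set String) (ks : List String)
    (hsh : ∀ p ∈ l, p.length = 2) (hk : m.keys = ks)
    (hsub : ∀ p ∈ l, banned.contains (p.getD 1 "") = true → p.getD 0 "" ∈ ks) :
    ((l.foldl (fun m p =>
        pvCase2 p (fun s t => if banned.contains t then m.modify s 0 (· + 1) else m) m) m).keys) = ks := by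
  induction l generalizing m with
  | nil => simpa using hk
  | cons p l ih =>
      obtain ⟨s, t, rfl⟩ := pv_shape p (hsh p (List.mem_cons_self ..))
      simp only [List.foldl_cons, pvCase2_pair]
      refine ih _ (fun q hq => hsh q (List.mem_cons_of_mem _ hq)) ?_
        (fun q hq hb => hsub q (List.mem_cons_of_mem _ hq) hb)
      by_cases hb : banned.contains t = true
      · rw [if_pos hb, PySem.Dict.keys_modify, pv_keys_insert_mem _ _ _ (by
          rw [hk]
          have : ([s, t] : List String).getD 0 "" = s := rfl
          exact this ▸ hsub _ (List.mem_cons_self ..) (by simpa using hb)), hk]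
      · rw [if_neg hb]
        exact hk

-- ---- counting infrastructure specific to these two programs ----

-- the deduplicated split pairs of the report list (B's `pairs`)
def pvSplits (rep : List String) : List (List String) :=
  PySem.Set.ofList (rep.map (fun r => PySem.Str.split₀ r))

-- the number of distinct (reporter, e) pairs (B's counts[e])
def pvCnt (rep : List String) (e : String) : Nat :=
  ((pvSplits rep).map (fun p => p.getD 1 "")).count e

theorem pv_split_eq (r : String) (h : (PySem.Str.split₀ r).length = 2) :
    PySem.Str.split₀ r = [pvSrc r, pvTgt r] := by
  obtain ⟨s, t, hp⟩ := pv_shape _ h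
  simp [pvSrc, pvTgt, hp]

theorem pv_shapeP (rep : List String) (hsh : ∀ r ∈ rep, (PySem.Str.split₀ r).length = 2) :
    ∀ p ∈ pvSplits rep, p.length = 2 := by
  intro p hp
  obtain ⟨r, hr, rfl⟩ := List.mem_map.mp ((PySem.Set.mem_ofList _ _).mp hp)
  exact hsh r hr

-- i reported e  ↔  the pair [i, e] is among the deduplicated splits
theorem pv_mem_real (rep : List String) (hsh : ∀ r ∈ rep, (PySem.Str.split₀ r).length = 2)
    (i e : String) : i ∈ pvReal rep e ↔ [i, e] ∈ pvSplits rep := by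
  rw [pvReal, PySem.Set.mem_ofList, pvSplits, PySem.Set.mem_ofList, pvReporters]
  constructor
  · intro h
    obtain ⟨r, hr, hsrc⟩ := List.mem_map.mp h
    obtain ⟨hrm, htgt⟩ := List.mem_filter.mp hr
    refine List.mem_map.mpr ⟨r, hrm, ?_⟩
    rw [pv_split_eq r (hsh r hrm), hsrc, eq_of_beq htgt]
  · intro h
    obtain ⟨r, hrm, hsp2⟩ := List.mem_map.mp h
    have hsrc : pvSrc r = i := by simp [pvSrc, hsp2]
    have htgt : pvTgt r = e := by simp [pvTgt, hsp2]
    exact List.mem_map.mpr ⟨r, List.mem_filter.mpr ⟨hrm, by simp [htgt]⟩, hsrc⟩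

-- B's count of distinct pairs with target e = the size of A's set of reporters of e
theorem pv_cnt_eq_len (rep : List String) (hsh : ∀ r ∈ rep, (PySem.Str.split₀ r).length = 2)
    (e : String) : pvCnt rep e = (pvReal rep e).length := by
  have hnP : (pvSplits rep).Nodup := PySem.Set.nodup_ofList _
  have hshP := pv_shapeP rep hsh
  rw [pvCnt, List.count_eq_countP, List.countP_map]
  have hlen : List.countP ((fun x => x == e) ∘ (fun p => p.getD 1 "")) (pvSplits rep) =
      (((pvSplits rep).filter (fun p => p.getD 1 "" == e)).map (fun p => p.getD 0 "")).length := by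
    rw [List.length_map, ← List.countP_eq_length_filter]
    rfl
  rw [hlen]
  set L := ((pvSplits rep).filter (fun p => p.getD 1 "" == e)).map (fun p => p.getD 0 "") with hL
  have hLnd : L.Nodup := by
    refine List.Nodup.map_on ?_ (List.Nodup.filter _ hnP)
    intro x hx y hy hxy
    obtain ⟨hxm, hxe⟩ := List.mem_filter.mp hx
    obtain ⟨hym, hye⟩ := List.mem_filter.mp hy
    obtain ⟨sx, tx, rfl⟩ := pv_shape x (hshP x hxm)
    obtain ⟨sy, ty, rfl⟩ := pv_shape y (hshP y hym)
    have hxe' : tx = e := by simpa using hxe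
    have hye' : ty = e := by simpa using hye
    simp_all
  have hRnd : (pvReal rep e).Nodup := PySem.Set.nodup_ofList _
  have hmemL : ∀ x, x ∈ L ↔ x ∈ pvReal rep e := by
    intro x
    rw [pv_mem_real rep hsh x e, hL]
    constructor
    · intro hx
      obtain ⟨p, hp, rfl⟩ := List.mem_map.mp hx
      obtain ⟨hpm, hpe⟩ := List.mem_filter.mp hp
      obtain ⟨s, t, rfl⟩ := pv_shape p (hshP p hpm)
      have ht : t = e := by simpa using hpe
      simpa [ht] using hpm
    · intro hx
      exact List.mem_map.mpr ⟨[x, e], List.mem_filter.mpr ⟨hx, by simp⟩, rfl⟩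
  have hfin : L.toFinset = (pvReal rep e).toFinset := by
    ext x
    simp only [List.mem_toFinset]
    exact hmemL x
  rw [← List.toFinset_card_of_nodup hLnd, ← List.toFinset_card_of_nodup hRnd, hfin]

-- splitting a count over the distinct pairs by the (Nodup) list of possible targets
theorem pv_partition (l : List (List String)) (ids : List String) (key : List String → String)
    (Q : List String → Bool) (hnd : ids.Nodup) (hmem : ∀ p ∈ l, key p ∈ ids) :
    l.countP Q = (ids.map (fun e => l.countP (fun p => Q p && (key p == e)))).sum := by
  induction l with
  | nil => simp
  | cons p l ih =>
      have hkey := hmem p (List.mem_cons_self ..)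
      simp only [List.countP_cons]
      rw [ih (fun q hq => hmem q (List.mem_cons_of_mem _ hq)), List.sum_map_add]
      congr 1
      rw [PySem.List.sum_map_ite_one_zero_nat]
      by_cases hQ : Q p = true
      · simp only [hQ, Bool.true_and]
        rw [if_pos trivial]
        have hcomm : (fun e => key p == e) = (fun e => e == key p) := by
          funext e
          exact Bool.beq_comm
        rw [hcomm, ← List.count_eq_countP, List.count_eq_one_of_mem hnd hkey]
      · have hQ' : Q p = false := by simpa using hQ
        simp [hQ']

-- the per-target contribution: B's per-pair count at (i, e) = A's indicator for e
theorem pv_term (rep : List String) (hsh : ∀ r ∈ rep, (PySem.Str.split₀ r).length = 2)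
    (k : Int) (i e : String) :
    (((pvSplits rep).countP (fun p =>
        (p.getD 0 "" == i && decide (k ≤ (pvCnt rep (p.getD 1 "") : Int))) && (p.getD 1 "" == e)) : Nat) : Int)
    = if k ≤ ((pvReal rep e).length : Int) ∧ i ∈ pvReal rep e then (1 : Int) else 0 := by
  have hshP := pv_shapeP rep hsh
  have hnP : (pvSplits rep).Nodup := PySem.Set.nodup_ofList _
  by_cases hk : k ≤ ((pvReal rep e).length : Int)
  · have hc : List.countP (fun p =>
        (p.getD 0 "" == i && decide (k ≤ (pvCnt rep (p.getD 1 "") : Int))) && (p.getD 1 "" == e)) (pvSplits rep)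
        = List.countP (fun p => p == [i, e]) (pvSplits rep) := by
      refine List.countP_congr ?_
      intro p hp
      obtain ⟨s, t, rfl⟩ := pv_shape p (hshP p hp)
      show ((s == i && decide (k ≤ (pvCnt rep t : Int))) && (t == e)) = true ↔ (([s, t] : List String) == [i, e]) = true
      simp only [Bool.and_eq_true, beq_iff_eq, decide_eq_true_eq]
      constructor
      · rintro ⟨⟨hsi, _⟩, hte⟩
        simp [hsi, hte]
      · intro hpe
        have hsi : s = i ∧ t = e := by simpa using hpe
        refine ⟨⟨hsi.1, ?_⟩, hsi.2⟩
        rw [hsi.2, pv_cnt_eq_len rep hsh e]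
        exact hk
    rw [hc, ← List.count_eq_countP]
    by_cases hm : i ∈ pvReal rep e
    · rw [List.count_eq_one_of_mem hnP ((pv_mem_real rep hsh i e).mp hm), if_pos ⟨hk, hm⟩]
      simp
    · rw [List.count_eq_zero_of_not_mem (fun h => hm ((pv_mem_real rep hsh i e).mpr h)),
        if_neg (by tauto)]
      simp
  · rw [if_neg (by tauto)]
    have hz : List.countP (fun p =>
        (p.getD 0 "" == i && decide (k ≤ (pvCnt rep (p.getD 1 "") : Int))) && (p.getD 1 "" == e)) (pvSplits rep) = 0 := by
      rw [List.countP_eq_zero]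
      intro p hp habs
      obtain ⟨s, t, rfl⟩ := pv_shape p (hshP p hp)
      have habs' : (s = i ∧ k ≤ (pvCnt rep t : Int)) ∧ t = e := by simpa using habs
      rw [habs'.2, pv_cnt_eq_len rep hsh e] at habs'
      exact hk habs'.1.2
    rw [hz]
    simp

-- the heart: A's double loop total at i = B's single count over the distinct pairs
theorem pv_core (ids rep : List String) (k : Int) (hnd : ids.Nodup)
    (hsh : ∀ r ∈ rep, (PySem.Str.split₀ r).length = 2)
    (hkeymem : ∀ p ∈ pvSplits rep, p.getD 1 "" ∈ ids)
    (i : String) :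
    (ids.map (fun e => if k ≤ ((pvReal rep e).length : Int) ∧ i ∈ pvReal rep e then (1 : Int) else 0)).sum
    = (((pvSplits rep).countP (fun p =>
        p.getD 0 "" == i && decide (k ≤ (pvCnt rep (p.getD 1 "") : Int))) : Nat) : Int) := by
  rw [pv_partition (pvSplits rep) ids (fun p => p.getD 1 "") _ hnd hkeymem]
  rw [Nat.cast_list_sum, List.map_map]
  refine congrArg List.sum (List.map_congr_left fun e _ => ?_)
  exact (pv_term rep hsh k i e).symm

-- Set.contains is membership
theorem pv_contains_iff (s : PySem.Set String) (x : String) :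
    PySem.Set.contains s x = true ↔ x ∈ s := by
  simp [PySem.Set.contains]

-- A's program, as a map of indicator sums
theorem pv_A_eq (ids rep : List String) (k : Int)
    (hsh : ∀ r ∈ rep, (PySem.Str.split₀ r).length = 2)
    (hsub : ∀ id ∈ ids, k ≤ ((pvReal rep id).length : Int) → ∀ s ∈ pvReal rep id, s ∈ PySem.Set.ofList ids) :
    solution ids rep k =
      (PySem.Set.ofList ids).map (fun i => (ids.map (fun e =>
        if k ≤ ((pvReal rep e).length : Int) ∧ i ∈ pvReal rep e then (1 : Int) else 0)).sum) := by
  simp only [solution]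
  have hblock : ∀ e, (rep.foldl (fun b r =>
      pvCase2 (PySem.Str.split₀ r) (fun s t => b.modify t [] (· ++ [s])) b) (ids.foldl (fun d i => d.insert i []) PySem.Dict.empty)).getD e [] = pvReporters rep e := by
    intro e
    rw [pv_blockA rep _ e hsh, pv_getD_seed ids _ _ e rfl, List.nil_append]
    rfl
  simp only [hblock]
  have hfold : ∀ e, PySem.Set.ofList (pvReporters rep e) = pvReal rep e := fun _ => rfl
  simp only [hfold]
  rw [PySem.List.foldl_append_singleton_eq_map, List.nil_append]
  rw [pv_keysA ids _ k (fun e => pvReal rep e) (PySem.Set.ofList ids) (pv_keys_seed ids _) hsub]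
  refine List.map_congr_left fun i _ => ?_
  rw [pv_mailA ids _ k (fun e => pvReal rep e) i (fun _ => PySem.Set.nodup_ofList _),
    pv_getD_seed ids _ _ i rfl, zero_add]

-- B's program, as a map of counts over the distinct pairs
theorem pv_B_eq (ids rep : List String) (k : Int)
    (hsh : ∀ r ∈ rep, (PySem.Str.split₀ r).length = 2)
    (hsrc : ∀ p ∈ pvSplits rep, k ≤ (pvCnt rep (p.getD 1 "") : Int) → p.getD 0 "" ∈ PySem.Set.ofList ids) :
    solution_alt ids rep k =
      (PySem.Set.ofList ids).map (fun i => (((pvSplits rep).countP (fun p =>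
        p.getD 0 "" == i && decide (k ≤ (pvCnt rep (p.getD 1 "") : Int))) : Nat) : Int)) := by
  have hshP := pv_shapeP rep hsh
  simp only [solution_alt]
  have hP : PySem.Set.ofList (rep.map (fun r => PySem.Str.split₀ r)) = pvSplits rep := rfl
  simp only [hP]
  have hcnt : ∀ e, ((pvSplits rep).foldl (fun c p =>
      pvCase2 p (fun _s t => c.insert t (c.getD t 0 + 1)) c) (PySem.Dict.empty : PySem.Dict String Int)).getD e 0 = (pvCnt rep e : Int) := by
    intro e
    rw [pv_countsB _ _ e hshP]
    have h0 : (PySem.Dict.empty : PySem.Dict String Int).getD e 0 = 0 := rfl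
    rw [h0, zero_add]
    rfl
  have hkeys : ((pvSplits rep).foldl (fun c p =>
      pvCase2 p (fun _s t => c.insert t (c.getD t 0 + 1)) c) (PySem.Dict.empty : PySem.Dict String Int)).keys
      = PySem.Set.ofList ((pvSplits rep).map (fun p => p.getD 1 "")) := by
    rw [pv_countsB_keys _ _ hshP]
    have h0 : (PySem.Dict.empty : PySem.Dict String Int).keys = [] := rfl
    rw [h0, PySem.Set.update_nil_left]
  have hknd : ((pvSplits rep).foldl (fun c p =>
      pvCase2 p (fun _s t => c.insert t (c.getD t 0 + 1)) c) (PySem.Dict.empty : PySem.Dict String Int)).keys.Nodup := by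
    rw [hkeys]
    exact PySem.Set.nodup_ofList _
  have hbanned : ∀ p ∈ pvSplits rep,
      PySem.Set.contains (PySem.Set.ofList ((((pvSplits rep).foldl (fun c p =>
        pvCase2 p (fun _s t => c.insert t (c.getD t 0 + 1)) c) (PySem.Dict.empty : PySem.Dict String Int)).items.filter
          (fun uc => k ≤ uc.2)).map (fun uc => uc.1))) (p.getD 1 "")
      = decide (k ≤ (pvCnt rep (p.getD 1 "") : Int)) := by
    intro p hp
    have hemem : p.getD 1 "" ∈ (pvSplits rep).map (fun p => p.getD 1 "") :=
      List.mem_map_of_mem hp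
    apply Bool.coe_iff_coe.mp
    rw [pv_contains_iff, PySem.Set.mem_ofList,
      PySem.Dict.items_eq_map_keys _ hknd 0, hkeys]
    constructor
    · intro hx
      obtain ⟨uc, hucf, hfst⟩ := List.mem_map.mp hx
      obtain ⟨hucm, hle⟩ := List.mem_filter.mp hucf
      obtain ⟨u, hum, rfl⟩ := List.mem_map.mp hucm
      have hle' : k ≤ ((pvCnt rep u : Nat) : Int) := by
        rw [← hcnt u]
        exact of_decide_eq_true hle
      have hux : u = p.getD 1 "" := hfst
      rw [hux] at hle'
      exact decide_eq_true hle'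
    · intro hle
      refine List.mem_map.mpr ⟨_, List.mem_filter.mpr ⟨List.mem_map.mpr ⟨p.getD 1 "", ?_, rfl⟩, ?_⟩, rfl⟩
      · exact (PySem.Set.mem_ofList _ _).mpr hemem
      · rw [hcnt]
        exact decide_eq_true (of_decide_eq_true hle)
  have hmkeys : ((pvSplits rep).foldl (fun m p =>
      pvCase2 p (fun s t => if PySem.Set.contains (PySem.Set.ofList ((((pvSplits rep).foldl (fun c p =>
        pvCase2 p (fun _s t => c.insert t (c.getD t 0 + 1)) c) (PySem.Dict.empty : PySem.Dict String Int)).items.filter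
          (fun uc => k ≤ uc.2)).map (fun uc => uc.1))) t then m.modify s 0 (· + 1) else m) m)
      (ids.foldl (fun m i => m.insert i (0 : Int)) PySem.Dict.empty)).keys = PySem.Set.ofList ids := by
    refine pv_mailB_keys _ _ _ _ hshP (pv_keys_seed ids _) ?_
    intro p hp hb
    refine hsrc p hp ?_
    have := hbanned p hp
    rw [this] at hb
    exact of_decide_eq_true hb
  rw [PySem.Dict.values_eq_map_keys _ (by rw [hmkeys]; exact PySem.Set.nodup_ofList _) 0, hmkeys]
  refine List.map_congr_left fun i _ => ?_
  rw [pv_mailB _ _ _ i hshP, pv_getD_seed ids _ _ i rfl, zero_add]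
  exact congrArg _ (List.countP_congr fun p hp => by rw [hbanned p hp])

-- the reporter-membership facts Pre_ provides
theorem pv_pre_sub (ids rep : List String) (k : Int) (hpre : Pre_solution ids rep k) :
    ∀ id ∈ ids, k ≤ ((pvReal rep id).length : Int) → ∀ s ∈ pvReal rep id,
      s ∈ PySem.Set.ofList ids := by
  intro id _ hk s hs
  obtain ⟨r, hr, rfl⟩ := List.mem_map.mp ((PySem.Set.mem_ofList _ _).mp hs)
  obtain ⟨hrm, htgt⟩ := List.mem_filter.mp hr
  rcases (hpre r hrm).2.2 with hin | hlt
  · exact (PySem.Set.mem_ofList _ _).mpr hin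
  · rw [eq_of_beq htgt] at hlt
    omega

-- both programs under Pre_, over the same deduplicated id list; A sums over id_list with multiplicity,
-- B over its dedup
theorem pv_main (ids rep : List String) (k : Int) (hpre : Pre_solution ids rep k) :
    solution ids rep k = (PySem.Set.ofList ids).map (fun i => (ids.map (fun e =>
        if k ≤ ((pvReal rep e).length : Int) ∧ i ∈ pvReal rep e then (1 : Int) else 0)).sum)
    ∧ solution_alt ids rep k = (PySem.Set.ofList ids).map (fun i => ((PySem.Set.ofList ids).map (fun e =>
        if k ≤ ((pvReal rep e).length : Int) ∧ i ∈ pvReal rep e then (1 : Int) else 0)).sum) := by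
  have hsh : ∀ r ∈ rep, (PySem.Str.split₀ r).length = 2 := fun r hr => (hpre r hr).1
  have hkeymem : ∀ p ∈ pvSplits rep, p.getD 1 "" ∈ PySem.Set.ofList ids := by
    intro p hp
    obtain ⟨r, hr, rfl⟩ := List.mem_map.mp ((PySem.Set.mem_ofList _ _).mp hp)
    exact (PySem.Set.mem_ofList _ _).mpr (hpre r hr).2.1
  have hsrc : ∀ p ∈ pvSplits rep, k ≤ (pvCnt rep (p.getD 1 "") : Int) →
      p.getD 0 "" ∈ PySem.Set.ofList ids := by
    intro p hp hk
    obtain ⟨r, hr, rfl⟩ := List.mem_map.mp ((PySem.Set.mem_ofList _ _).mp hp)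
    rcases (hpre r hr).2.2 with hin | hlt
    · exact (PySem.Set.mem_ofList _ _).mpr hin
    · rw [pv_cnt_eq_len rep hsh] at hk
      have hlt' : ((pvReal rep ((PySem.Str.split₀ r).getD 1 "")).length : Int) < k := hlt
      omega
  refine ⟨pv_A_eq ids rep k hsh (pv_pre_sub ids rep k hpre), ?_⟩
  rw [pv_B_eq ids rep k hsh hsrc]
  exact List.map_congr_left fun i _ =>
    (pv_core (PySem.Set.ofList ids) rep k (PySem.Set.nodup_ofList ids) hsh hkeymem i).symm

-- ===== VERDICT (by name: the statement is the Claim_ definition above) =====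
theorem solution_spec : Claim_unchanged_solution := by
  intro ids rep k _ hpre hnd
  obtain ⟨hA, hB⟩ := pv_main ids rep k hpre
  rw [hA, hB]
  refine List.map_congr_left fun i _ => ?_
  refine pv_sum_dedup ids _ ?_
  intro e hem hcnt2
  rw [if_neg]
  rintro ⟨hk, hmem⟩
  exact hnd ⟨e, hem, hcnt2, hk, List.ne_nil_of_mem hmem⟩

theorem solution_changed : Claim_changed_solution := by
  unfold Claim_changed_solution
  decide

theorem solution_tight : Claim_exact_solution := by
  intro ids rep k _ hpre hd heq
  obtain ⟨hA, hB⟩ := pv_main ids rep k hpre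
  rw [hA, hB] at heq
  obtain ⟨e, hem, h2, hk, hne⟩ := hd
  obtain ⟨i0, hi0⟩ := List.exists_mem_of_ne_nil _ hne
  have hi0ids : i0 ∈ PySem.Set.ofList ids := pv_pre_sub ids rep k hpre e hem hk i0 hi0
  have hpoint := List.map_inj_left.mp heq i0 hi0ids
  have hlt := pv_sum_dedup_lt ids (fun e' =>
      if k ≤ ((pvReal rep e').length : Int) ∧ i0 ∈ pvReal rep e' then (1 : Int) else 0)
    (fun e' => by dsimp only []; split <;> norm_num) e hem h2
    (by dsimp only []; rw [if_pos ⟨hk, hi0⟩]; norm_num)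
  omega
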